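-- pv_equiv track=rewrite | github.com/Cezaryisnotavailable/PyCamp | just_extra_file.py | find_two_multipliers_for_product
-- ===== SOURCE A (Python) =====
-- def find_two_multipliers_for_product(product):
--     product = int(product)
--     list_of_multipliers = list(range(1, 10))
--     multipliers = []
--     for i in list_of_multipliers:
--         for j in list_of_multipliers:
--             if i * j == product:
--                 multipliers.append((i, j))
--     return multipliers
-- ===== SOURCE B (Python) =====
-- def find_two_multipliers_for_product(product):
--     product = int(product)
--     multipliers = []
--     for i in range(1, 10):
--         if product % i == 0 and 1 <= product // i <= 9:
--             multipliers.append((i, product // i))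
--     return multipliers
-- ===== Notes on version B (the rewrite author's own statement) =====
-- stated objective: simpler
-- what changed: Replaces the 9x9 double loop over all (i,j) products with a single divisor scan over i in 1..9 that checks divisibility and that the quotient lies in 1..9, appending (i, product//i).
import Mathlib
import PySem

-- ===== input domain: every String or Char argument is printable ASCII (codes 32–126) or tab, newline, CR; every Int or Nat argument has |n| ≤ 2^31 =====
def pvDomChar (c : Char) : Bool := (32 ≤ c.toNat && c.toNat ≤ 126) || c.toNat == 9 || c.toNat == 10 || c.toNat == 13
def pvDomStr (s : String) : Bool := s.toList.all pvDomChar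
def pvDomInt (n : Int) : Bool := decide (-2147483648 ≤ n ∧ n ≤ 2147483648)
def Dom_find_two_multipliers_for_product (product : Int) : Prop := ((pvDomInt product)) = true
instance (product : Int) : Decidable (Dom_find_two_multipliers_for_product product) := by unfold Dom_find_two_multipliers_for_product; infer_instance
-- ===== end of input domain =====

-- B replaces A's 9×9 double loop over all digit pairs with a single divisor scan
-- over i in 1..9 (objective: simpler).

-- ===== PORT A =====
-- A: enumerate every (i, j) in [1..9] × [1..9] and append the pair when i*j == product.
-- (int(product) is the identity on an int argument.)
def find_two_multipliers_for_product (product : Int) : List (Int × Int) :=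
  let list_of_multipliers := PySem.List.pyRange 1 10 1
  let multipliers : List (Int × Int) := []
  list_of_multipliers.foldl
    (fun multipliers i =>
      list_of_multipliers.foldl
        (fun multipliers j =>
          if i * j = product then multipliers ++ [(i, j)] else multipliers)
        multipliers)
    multipliers

-- ===== PORT B =====
-- B: one scan over i in 1..9; append (i, product // i) when i divides product and
-- the quotient lies in 1..9.
def find_two_multipliers_for_product_alt (product : Int) : List (Int × Int) :=
  (PySem.List.pyRange 1 10 1).foldl
    (fun multipliers i =>
      if PySem.Int.mod product i = 0 ∧
         1 ≤ PySem.Int.floordiv product i ∧ PySem.Int.floordiv product i ≤ 9 then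
        multipliers ++ [(i, PySem.Int.floordiv product i)]
      else multipliers)
    []

-- ===== PRECONDITION & SPEC =====
def Spec_find_two_multipliers_for_product (product : Int) (out : List (Int × Int)) : Prop := out = find_two_multipliers_for_product_alt product
instance (product : Int) (out : List (Int × Int)) : Decidable (Spec_find_two_multipliers_for_product product out) := by unfold Spec_find_two_multipliers_for_product; infer_instance

-- ===== CLAIM (what is proved, stated in full; the proofs are below) =====
def Claim_equal_find_two_multipliers_for_product : Prop := ∀ (product : Int), Dom_find_two_multipliers_for_product product → Spec_find_two_multipliers_for_product product (find_two_multipliers_for_product product)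

-- ===== LEMMAS AND PROOFS =====

-- a fold whose body fixes every accumulator on the members of the list is the identity
theorem pv_foldl_id {α β : Type} (f : List α → β → List α) (l : List β) (a : List α)
    (h : ∀ (acc : List α) (x : β), x ∈ l → f acc x = acc) : l.foldl f a = a := by
  induction l generalizing a with
  | nil => rfl
  | cons x xs ih =>
    simp only [List.foldl_cons]
    rw [h a x (by simp)]
    exact ih a (fun acc y hy => h acc y (by simp [hy]))

-- out of range 1..81 both sides return the empty list
theorem pv_out_of_range (product : Int) (hp : product < 1 ∨ 81 < product) :
    find_two_multipliers_for_product product = find_two_multipliers_for_product_alt product := by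
  have hA : find_two_multipliers_for_product product = [] := by
    unfold find_two_multipliers_for_product
    apply pv_foldl_id
    intro acc i hi
    rw [PySem.List.mem_pyRange_one] at hi
    apply pv_foldl_id
    intro acc2 j hj
    rw [PySem.List.mem_pyRange_one] at hj
    obtain ⟨hi1, hi2⟩ := hi
    obtain ⟨hj1, hj2⟩ := hj
    rw [if_neg]
    intro heq
    have h1 : i * j ≤ 81 := by nlinarith
    have h2 : 1 ≤ i * j := by nlinarith
    omega
  have hB : find_two_multipliers_for_product_alt product = [] := by
    unfold find_two_multipliers_for_product_alt
    apply pv_foldl_id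
    intro acc i hi
    rw [PySem.List.mem_pyRange_one] at hi
    have hi1 : 0 < i := by omega
    rw [if_neg]
    rw [PySem.Int.mod_eq_emod_of_pos hi1, PySem.Int.floordiv_eq_ediv_of_pos hi1]
    intro ⟨h1, h2, h3⟩
    have hd := Int.mul_ediv_add_emod product i
    have h4 : product % i = 0 := h1
    have h5 : product = i * (product / i) := by omega
    have h6 : i * (product / i) ≤ 81 := by nlinarith
    have h7 : 1 ≤ i * (product / i) := by nlinarith
    omega
  rw [hA, hB]

-- ===== VERDICT (by name: the statement is the Claim_ definition above) =====
theorem find_two_multipliers_for_product_spec : Claim_equal_find_two_multipliers_for_product := by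
  intro product _
  unfold Spec_find_two_multipliers_for_product
  by_cases hp : 1 ≤ product ∧ product ≤ 81
  · obtain ⟨h1, h2⟩ := hp
    interval_cases product <;> decide
  · exact pv_out_of_range product (by omega)
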